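-- pv_equiv track=rewrite | github.com/vishalpmittal/practice-fun | funNLearn/src/main/java/dsAlgo/hashmap/FileNames.py | fileNaming
-- ===== SOURCE A (Python) =====
-- def fileNaming(names):
--     if not names:
--         return names
--
--     FND = dict()
--     out_names = []
--
--     for base_name in names:
--         if base_name not in FND:
--             FND[base_name] = 1
--             out_names.append(base_name)
--             continue
--
--         curr_int = FND[base_name]
--         curr_name = base_name + f'({curr_int})'
--
--         while curr_name in FND:
--             curr_int += 1
--             curr_name = base_name + f'({curr_int})'
--
--         FND[base_name] = curr_int + 1
--         FND[curr_name] = 1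
--         out_names.append(curr_name)
--
--     return out_names
-- ===== SOURCE B (Python) =====
-- def fileNaming(names):
--     if not names:
--         return names
--     out = []
--     for name in names:
--         if name in out:
--             pre = name + '('
--             taken = {s[len(pre):len(s)-1] for s in out
--                      if s.startswith(pre) and s.endswith(')')}
--             k = 1
--             while f'{k}' in taken:
--                 k += 1
--             name = f'{name}({k})'
--         out.append(name)
--     return out
-- ===== Notes on version B (the rewrite author's own statement) =====
-- stated objective: alternative
-- what changed: Removes A's persistent dict of per-base next-suffix pointers and its candidate-name probing loop: on a collision B parses the '(k)' suffixes of that base already present in the output list (string slicing into a throwaway set) and picks the least positive k not among them (a mex over parsed suffix strings).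
import Mathlib
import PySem

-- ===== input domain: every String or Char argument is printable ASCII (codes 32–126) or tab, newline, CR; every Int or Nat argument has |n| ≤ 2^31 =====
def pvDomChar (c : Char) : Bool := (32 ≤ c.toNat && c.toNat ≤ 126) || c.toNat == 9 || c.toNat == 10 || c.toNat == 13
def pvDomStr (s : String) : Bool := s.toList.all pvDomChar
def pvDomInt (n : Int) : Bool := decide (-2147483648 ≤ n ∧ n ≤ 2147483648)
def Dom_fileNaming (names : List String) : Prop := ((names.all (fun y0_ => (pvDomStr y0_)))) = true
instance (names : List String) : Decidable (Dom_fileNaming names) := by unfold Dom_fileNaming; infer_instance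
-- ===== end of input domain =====

-- B drops A's dict of per-base next-suffix pointers entirely: on a collision it parses the
-- "(k)" suffixes already present in the output list and takes the least unused k (a mex),
-- instead of probing candidate names against a persistent lookup structure.


-- shared: base + f'({k})'
def pyName (base : String) (k : Int) : String := base ++ "(" ++ PySem.Int.toStr k ++ ")"

-- ===== PORT A =====
-- the 'while curr_name in FND' loop; fuel only makes it total (it is proved sufficient below)
def findA (fnd : PySem.Dict String Int) (base : String) : Nat → Int → Int
  | 0, k => k
  | fuel+1, k => if fnd.contains (pyName base k) then findA fnd base fuel (k+1) else k

def stepA (st : PySem.Dict String Int × List String) (base : String) :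
    PySem.Dict String Int × List String :=
  let fnd := st.1
  let out := st.2
  if !(fnd.contains base) then
    (fnd.insert base 1, out ++ [base])
  else
    let k := findA fnd base (fnd.size + 1) (fnd.getD base 0)
    ((fnd.insert base (k + 1)).insert (pyName base k) 1, out ++ [pyName base k])

def fileNaming (names : List String) : List String :=
  if names = [] then names
  else (names.foldl stepA (PySem.Dict.empty, ([] : List String))).2

-- ===== PORT B =====
-- s[len(pre):len(s)-1]
def midB (pre s : String) : String :=
  PySem.Str.slice s (some ((PySem.Str.len pre : Int))) (some ((PySem.Str.len s : Int) - 1))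

-- the set comprehension {s[len(pre):len(s)-1] for s in out if s.startswith(pre) and s.endswith(')')}
def takenB (out : List String) (pre : String) : PySem.Set String :=
  out.foldl (fun t s =>
    if PySem.Str.startswith s pre && PySem.Str.endswith s ")" then PySem.Set.add t (midB pre s)
    else t) PySem.Set.empty

-- the "while f'{k}' in taken" mex loop; fuel only makes it total (proved sufficient below)
def findB (taken : PySem.Set String) : Nat → Int → Int
  | 0, k => k
  | fuel+1, k => if PySem.Set.contains taken (PySem.Int.toStr k) then findB taken fuel (k+1) else k

def placeB (out : List String) (name : String) : List String :=
  if decide (name ∈ out) then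
    out ++ [pyName name (findB (takenB out (name ++ "(")) (out.length + 1) 1)]
  else out ++ [name]

def fileNaming_alt (names : List String) : List String :=
  if names = [] then names
  else names.foldl placeB ([] : List String)

-- ===== PRECONDITION & SPEC =====
def Spec_fileNaming (names : List String) (out : List String) : Prop := out = fileNaming_alt names
instance (names : List String) (out : List String) : Decidable (Spec_fileNaming names out) := by unfold Spec_fileNaming; infer_instance

-- ===== CLAIM (what is proved, stated in full; the proofs are below) =====
def Claim_equal_fileNaming : Prop := ∀ (names : List String), Dom_fileNaming names → Spec_fileNaming names (fileNaming names)

-- ===== LEMMAS AND PROOFS =====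

-- decoding str(n) back to n, to show distinct k give distinct names
def pvDec (a : Nat) (l : List Char) : Nat := l.foldl (fun x c => 10*x + (c.toNat - 48)) a

lemma pvDigitChar (m : Nat) (h : m < 10) : (Nat.digitChar m).toNat - 48 = m := by
  interval_cases m <;> decide

lemma pvDec_toDigitsCore : ∀ n : Nat, ∀ fuel ds a, n < fuel →
    ∃ e : Nat, 0 < e ∧ pvDec a (Nat.toDigitsCore 10 fuel n ds) = pvDec (a*e + n) ds := by
  intro n
  induction n using Nat.strong_induction_on with
  | _ n IH =>
    intro fuel ds a hf
    match fuel, hf with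
    | fuel+1, hf =>
      rw [Nat.toDigitsCore]
      by_cases h10 : n / 10 = 0
      · simp only [h10, if_pos]
        refine ⟨10, by omega, ?_⟩
        simp only [pvDec, List.foldl, pvDigitChar (n % 10) (by omega)]
        congr 1
        omega
      · simp only [h10, ite_false]
        obtain ⟨e', he', heq⟩ := IH (n/10) (by omega) fuel (Nat.digitChar (n % 10) :: ds) a (by omega)
        refine ⟨10*e', by omega, ?_⟩
        rw [heq]
        simp [pvDec, pvDigitChar (n % 10) (by omega)]
        ring_nf
        congr 1
        omega

lemma pvDec_toDigits (n : Nat) : pvDec 0 (Nat.toDigits 10 n) = n := by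
  obtain ⟨e, he, heq⟩ := pvDec_toDigitsCore n (n+1) [] 0 (by omega)
  simp only [pvDec, List.foldl, Nat.zero_mul, Nat.zero_add] at heq
  exact heq

lemma pvToChars_inj {j1 j2 : Int} (h1 : 1 ≤ j1) (h2 : 1 ≤ j2)
    (h : PySem.Int.toChars j1 = PySem.Int.toChars j2) : j1 = j2 := by
  unfold PySem.Int.toChars at h
  rw [if_neg (by omega), if_neg (by omega)] at h
  have := congrArg (pvDec 0) h
  rw [pvDec_toDigits, pvDec_toDigits] at this
  omega

lemma pvName_inj (base : String) {j1 j2 : Int} (h1 : 1 ≤ j1) (h2 : 1 ≤ j2)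
    (h : pyName base j1 = pyName base j2) : j1 = j2 := by
  apply pvToChars_inj h1 h2
  have hl := congrArg String.toList h
  simp only [pyName, String.toList_append, PySem.Int.toList_toStr] at hl
  exact List.append_cancel_left (List.append_cancel_right hl)

-- within |S|+1 probes from any k ≥ 1 a free suffix exists (the probed names are distinct)
lemma pvExistsFree (S : List String) (base : String) (k : Int) (hk : 1 ≤ k) :
    ∃ j : Nat, j ≤ S.length ∧ pyName base (k + j) ∉ S := by
  by_contra hcon
  push Not at hcon
  have hinj : Function.Injective (fun j : Nat => pyName base (k + j)) := by
    intro a b hab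
    have := pvName_inj base (by omega) (by omega) hab
    omega
  have hnodL : ((List.range (S.length+1)).map (fun j : Nat => pyName base (k+j))).Nodup :=
    List.nodup_range.map hinj
  have hsub : ((List.range (S.length+1)).map (fun j : Nat => pyName base (k+j))) ⊆ S := by
    intro y hy
    simp only [List.mem_map, List.mem_range] at hy
    obtain ⟨j, hj, rfl⟩ := hy
    exact hcon j (by omega)
  have := (hnodL.subperm hsub).length_le
  simp at this

-- the common shape of both while-loops
def pvFind (C : Int → Bool) : Nat → Int → Int
  | 0, k => k
  | fuel+1, k => if C k then pvFind C fuel (k+1) else k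

lemma findA_eq_pvFind (fnd : PySem.Dict String Int) (base : String) :
    ∀ (fuel : Nat) (k : Int), findA fnd base fuel k = pvFind (fun m => fnd.contains (pyName base m)) fuel k := by
  intro fuel
  induction fuel with
  | zero => intro k; rfl
  | succ fuel IH => intro k; simp only [findA, pvFind, IH]

lemma findB_eq_pvFind (taken : PySem.Set String) :
    ∀ (fuel : Nat) (k : Int), findB taken fuel k = pvFind (fun m => PySem.Set.contains taken (PySem.Int.toStr m)) fuel k := by
  intro fuel
  induction fuel with
  | zero => intro k; rfl
  | succ fuel IH => intro k; simp only [findB, pvFind, IH]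

lemma pvFind_spec (C : Int → Bool) : ∀ (fuel : Nat) (k : Int),
    (∃ j : Nat, j < fuel ∧ C (k+j) = false) →
    C (pvFind C fuel k) = false ∧ k ≤ pvFind C fuel k ∧
      ∀ m, k ≤ m → m < pvFind C fuel k → C m = true := by
  intro fuel
  induction fuel with
  | zero => rintro k ⟨j, hj, _⟩; omega
  | succ fuel IH =>
    rintro k ⟨j, hj, hfree⟩
    by_cases hC : C k = true
    · have hj0 : j ≠ 0 := by
        intro h
        rw [h] at hfree
        simp at hfree
        rw [hfree] at hC
        exact absurd hC (by simp)
      obtain ⟨ih1, ih2, ih3⟩ := IH (k+1) ⟨j-1, by omega, by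
        have : k + 1 + ((j-1 : Nat) : Int) = k + j := by omega
        rw [this]; exact hfree⟩
      refine ⟨by simpa [pvFind, hC] using ih1, by simp only [pvFind, hC, if_pos]; omega, ?_⟩
      intro m hm1 hm2
      simp only [pvFind, hC, if_pos] at hm2 ⊢
      rcases eq_or_lt_of_le hm1 with rfl | hlt
      · exact hC
      · exact ih3 m (by omega) hm2
    · simp only [Bool.not_eq_true] at hC
      refine ⟨by simp [pvFind, hC], by simp [pvFind, hC], ?_⟩
      intro m hm1 hm2
      simp [pvFind, hC] at hm2
      omega

-- s[a : len(s)-1] on a list P ++ r ++ [c] with a = |P| extracts r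
lemma pvSliceMid (P r : List Char) (c : Char) :
    PySem.List.slice (P ++ r ++ [c]) (some (P.length : Int))
      (some (((P ++ r ++ [c]).length : Int) - 1)) = r := by
  have hcast : ((((P ++ r ++ [c]).length : Int)) - 1) = ((P.length + r.length : Nat) : Int) := by
    simp [List.length_append]
    omega
  rw [hcast, PySem.List.slice_natCast, List.append_assoc, List.drop_left]
  have h2 : P.length + r.length - P.length = r.length := by omega
  rw [h2, List.take_left]

-- membership in the comprehension set: some s in out parses as (pre, x, ')')
lemma pvMemTaken (out : List String) (pre x : String) :
    x ∈ takenB out pre ↔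
      ∃ s ∈ out, (PySem.Str.startswith s pre && PySem.Str.endswith s ")") = true ∧ midB pre s = x := by
  unfold takenB
  suffices h : ∀ t : PySem.Set String,
      x ∈ out.foldl (fun t s =>
        if PySem.Str.startswith s pre && PySem.Str.endswith s ")" then PySem.Set.add t (midB pre s)
        else t) t ↔
      x ∈ t ∨ ∃ s ∈ out, (PySem.Str.startswith s pre && PySem.Str.endswith s ")") = true ∧ midB pre s = x by
    rw [h PySem.Set.empty]
    simp [PySem.Set.empty]
  induction out with
  | nil => intro t; simp
  | cons s rest IH =>
    intro t
    simp only [List.foldl_cons]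
    by_cases hc : (PySem.Str.startswith s pre && PySem.Str.endswith s ")") = true
    · rw [if_pos hc, IH, PySem.Set.mem_add]
      constructor
      · rintro (⟨hx | rfl⟩ | ⟨u, hu, hcu, hmu⟩)
        · exact Or.inl hx
        · exact Or.inr ⟨s, by simp, hc, rfl⟩
        · exact Or.inr ⟨u, by simp [hu], hcu, hmu⟩
      · rintro (hx | ⟨u, hu, hcu, hmu⟩)
        · exact Or.inl (Or.inl hx)
        · rcases List.mem_cons.mp hu with rfl | hu'
          · exact Or.inl (Or.inr hmu.symm)
          · exact Or.inr ⟨u, hu', hcu, hmu⟩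
    · rw [if_neg hc, IH]
      constructor
      · rintro (hx | ⟨u, hu, hcu, hmu⟩)
        · exact Or.inl hx
        · exact Or.inr ⟨u, by simp [hu], hcu, hmu⟩
      · rintro (hx | ⟨u, hu, hcu, hmu⟩)
        · exact Or.inl hx
        · rcases List.mem_cons.mp hu with rfl | hu'
          · exact absurd hcu hc
          · exact Or.inr ⟨u, hu', hcu, hmu⟩

-- the parse is exact: s contributes str(k) to taken(out, name+'(') iff s = name+f'({k})'
lemma pvParse (name s : String) (k : Int) :
    ((PySem.Str.startswith s (name ++ "(") && PySem.Str.endswith s ")") = true ∧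
      midB (name ++ "(") s = PySem.Int.toStr k) ↔ s = pyName name k := by
  constructor
  · rintro ⟨hc, hm⟩
    rw [Bool.and_eq_true] at hc
    obtain ⟨hs, he⟩ := hc
    rw [PySem.Str.startswith_eq] at hs
    rw [PySem.Str.endswith_eq] at he
    obtain ⟨r, hr⟩ := (PySem.Chars.startswith_iff _ _).mp hs
    obtain ⟨f, hf⟩ := (PySem.Chars.endswith_iff _ _).mp he
    -- r is nonempty: otherwise s ends with '(' and with ')'
    have hrne : r ≠ [] := by
      intro h0
      subst h0
      rw [List.append_nil] at hr
      rw [← hr] at hf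
      have := congrArg (List.getLast? ·) hf
      simp [String.toList_append] at this
    obtain ⟨m, c, hmc⟩ : ∃ m c, r = m ++ [c] :=
      ⟨r.dropLast, r.getLast hrne, (List.dropLast_append_getLast hrne).symm⟩
    have hcz : c = ')' := by
      have he2 : ((name ++ "(").toList ++ m) ++ [c] = f ++ [')'] := by
        rw [List.append_assoc, ← hmc, hr, ← hf]
        simp
      obtain ⟨-, h3⟩ := List.append_inj' he2 (by simp)
      simpa using h3
    have hsl : s.toList = (name ++ "(").toList ++ m ++ [')'] := by
      rw [← hr, hmc, hcz, List.append_assoc]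
    -- midB computes m
    have hmid : (midB (name ++ "(") s).toList = m := by
      unfold midB
      rw [PySem.Str.toList_slice]
      simp only [PySem.Chars.slice_eq_listSlice, PySem.Str.len_eq, hsl]
      exact pvSliceMid _ m ')'
    rw [hm] at hmid
    apply String.toList_inj.mp
    rw [hsl, ← hmid, pyName]
    simp [String.toList_append]
  · rintro rfl
    have hsl : (pyName name k).toList = (name ++ "(").toList ++ (PySem.Int.toChars k) ++ [')'] := by
      simp [pyName, String.toList_append, PySem.Int.toList_toStr]
    refine ⟨?_, ?_⟩
    · rw [Bool.and_eq_true, PySem.Str.startswith_eq, PySem.Str.endswith_eq]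
      constructor
      · apply (PySem.Chars.startswith_iff _ _).mpr
        exact ⟨PySem.Int.toChars k ++ [')'], by rw [hsl, List.append_assoc]⟩
      · apply (PySem.Chars.endswith_iff _ _).mpr
        exact ⟨(name ++ "(").toList ++ PySem.Int.toChars k, by rw [hsl]; simp⟩
    · apply String.toList_inj.mp
      unfold midB
      rw [PySem.Str.toList_slice]
      simp only [PySem.Chars.slice_eq_listSlice, PySem.Str.len_eq, hsl]
      rw [pvSliceMid _ (PySem.Int.toChars k) ')', PySem.Int.toList_toStr]

-- hence: str(k) ∈ taken(out, name+'(') exactly when name+f'({k})' was emitted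
lemma pvContainsTaken (out : List String) (name : String) (k : Int) :
    PySem.Set.contains (takenB out (name ++ "(")) (PySem.Int.toStr k) = decide (pyName name k ∈ out) := by
  simp only [PySem.Set.contains, List.contains_eq_mem, decide_eq_decide]
  rw [pvMemTaken]
  constructor
  · rintro ⟨s, hs, hc, hm⟩
    rw [(pvParse name s k).mp ⟨hc, hm⟩] at hs
    exact hs
  · intro h
    exact ⟨pyName name k, h, (pvParse name (pyName name k) k).mpr rfl⟩

-- the relating invariant: A's dict keys are exactly the names emitted so far (B's whole state);
-- cached pointers only skip occupied suffixes
def pvInv (fnd : PySem.Dict String Int) (out : List String) : Prop :=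
  fnd.keys = out ∧
  ∀ b p, fnd.get? b = some p → 1 ≤ p ∧ ∀ j : Int, 1 ≤ j → j < p → pyName b j ∈ out

lemma pvFindAB (fnd : PySem.Dict String Int) (out : List String) (x : String)
    (h : pvInv fnd out) (hx : fnd.contains x = true) :
    findB (takenB out (x ++ "(")) (out.length+1) 1 = findA fnd x (fnd.size+1) (fnd.getD x 0) ∧
    1 ≤ findA fnd x (fnd.size+1) (fnd.getD x 0) ∧
    pyName x (findA fnd x (fnd.size+1) (fnd.getD x 0)) ∉ out ∧
    ∀ j : Int, 1 ≤ j → j < findA fnd x (fnd.size+1) (fnd.getD x 0) → pyName x j ∈ out := by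
  obtain ⟨hkeys, hptr⟩ := h
  cases hget : fnd.get? x with
  | none => rw [PySem.Dict.get?_eq_none_iff_contains] at hget; rw [hget] at hx; exact absurd hx (by simp)
  | some p =>
  have hgd : fnd.getD x 0 = p := PySem.Dict.getD_of_get?_eq_some fnd 0 hget
  obtain ⟨hp1, hocc⟩ := hptr x p hget
  have hCA : (fun m => fnd.contains (pyName x m)) = (fun m => decide (pyName x m ∈ out)) := by
    funext m
    rw [PySem.Dict.contains_eq_decide_mem_keys, hkeys]
  have hCB : (fun m => PySem.Set.contains (takenB out (x ++ "(")) (PySem.Int.toStr m)) =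
      (fun m => decide (pyName x m ∈ out)) := by
    funext m
    exact pvContainsTaken out x m
  have hsize : fnd.size = out.length := by
    rw [← hkeys]
    simp [PySem.Dict.size, PySem.Dict.keys]
  set C : Int → Bool := fun m => decide (pyName x m ∈ out) with hC
  obtain ⟨jA, hjA, hfA⟩ := pvExistsFree out x p hp1
  obtain ⟨jB, hjB, hfB⟩ := pvExistsFree out x 1 (by omega)
  obtain ⟨sA1, sA2, sA3⟩ := pvFind_spec C (fnd.size+1) p ⟨jA, by omega, by simp [hC, hfA]⟩
  obtain ⟨sB1, sB2, sB3⟩ := pvFind_spec C (out.length+1) 1 ⟨jB, by omega, by simp [hC, hfB]⟩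
  rw [findA_eq_pvFind, findB_eq_pvFind, hgd, hCA, hCB]
  set kA := pvFind C (fnd.size+1) p with hkA
  set kB := pvFind C (out.length+1) 1 with hkB
  have hbelow : ∀ m : Int, 1 ≤ m → m < kA → C m = true := by
    intro m h1 h2
    by_cases hmp : m < p
    · simp [hC, hocc m h1 hmp]
    · exact sA3 m (by omega) h2
  have hkeq : kB = kA := by
    rcases lt_trichotomy kB kA with hlt | heq | hlt
    · rw [hbelow kB (by omega) hlt] at sB1; exact absurd sB1 (by simp)
    · exact heq
    · rw [sB3 kA (by omega) hlt] at sA1; exact absurd sA1 (by simp)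
  refine ⟨hkeq, by omega, ?_, ?_⟩
  · intro hmem
    rw [show C kA = true by simp [hC, hmem]] at sA1
    exact absurd sA1 (by simp)
  · intro j h1 h2
    have := hbelow j h1 h2
    simpa [hC] using this

lemma pvStep (fnd : PySem.Dict String Int) (out : List String)
    (x : String) (h : pvInv fnd out) :
    (stepA (fnd, out) x).2 = placeB out x ∧
    pvInv (stepA (fnd, out) x).1 (placeB out x) := by
  obtain ⟨hkeys, hptr⟩ := h
  have hmem : fnd.contains x = decide (x ∈ out) := by
    rw [PySem.Dict.contains_eq_decide_mem_keys, hkeys]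
  by_cases hx : x ∈ out
  · -- collision branch
    have hxA : fnd.contains x = true := by simp [hmem, hx]
    obtain ⟨hBA, hk1, hfree, hocc⟩ := pvFindAB fnd out x ⟨hkeys, hptr⟩ hxA
    set k := findA fnd x (fnd.size+1) (fnd.getD x 0) with hk
    simp only [stepA, placeB, hxA, hx, decide_true, Bool.not_true, Bool.false_eq_true,
      if_false, if_true, ← hk, hBA]
    refine ⟨by trivial, ?_, ?_⟩
    · -- keys
      have h1 : (fnd.insert x (k+1)).keys = fnd.keys := PySem.Dict.keys_insert_of_contains fnd _ hxA
      have h2 : ((fnd.insert x (k+1)).insert (pyName x k) 1).keys = (fnd.insert x (k+1)).keys ++ [pyName x k] := by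
        apply PySem.Dict.keys_insert_of_not_contains
        rw [PySem.Dict.contains_eq_decide_mem_keys, h1, hkeys]
        simp [hfree]
      rw [h2, h1, hkeys]
    · -- pointers
      intro b p hbp
      rw [PySem.Dict.get?_insert] at hbp
      by_cases hb1 : b = pyName x k
      · rw [if_pos hb1] at hbp
        cases hbp
        exact ⟨le_refl 1, by intro j h1 h2; omega⟩
      · rw [if_neg hb1, PySem.Dict.get?_insert] at hbp
        by_cases hb2 : b = x
        · rw [if_pos hb2] at hbp
          cases hbp
          subst hb2
          refine ⟨by omega, ?_⟩
          intro j h1 h2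
          by_cases hjk : j < k
          · exact List.mem_append_left _ (hocc j h1 hjk)
          · have : j = k := by omega
            subst this
            simp
        · rw [if_neg hb2] at hbp
          obtain ⟨hq1, hq2⟩ := hptr b p hbp
          exact ⟨hq1, fun j h1 h2 => List.mem_append_left _ (hq2 j h1 h2)⟩
  · -- fresh branch
    have hxA : fnd.contains x = false := by simp [hmem, hx]
    simp only [stepA, placeB, hxA, hx, decide_false, Bool.not_false, if_true, Bool.false_eq_true, if_false]
    refine ⟨by trivial, ?_, ?_⟩
    · rw [PySem.Dict.keys_insert_of_not_contains fnd 1 hxA, hkeys]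
    · intro b p hbp
      rw [PySem.Dict.get?_insert] at hbp
      by_cases hb : b = x
      · rw [if_pos hb] at hbp
        cases hbp
        exact ⟨le_refl 1, by intro j h1 h2; omega⟩
      · rw [if_neg hb] at hbp
        obtain ⟨hq1, hq2⟩ := hptr b p hbp
        exact ⟨hq1, fun j h1 h2 => List.mem_append_left _ (hq2 j h1 h2)⟩

lemma pvLoop : ∀ (names : List String) (fnd : PySem.Dict String Int)
    (out : List String), pvInv fnd out →
    (names.foldl stepA (fnd, out)).2 = names.foldl placeB out := by
  intro names
  induction names with
  | nil => intro fnd out _; rfl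
  | cons x t IH =>
    intro fnd out h
    obtain ⟨hout, hinv⟩ := pvStep fnd out x h
    simp only [List.foldl_cons]
    have eA : stepA (fnd, out) x = ((stepA (fnd, out) x).1, placeB out x) := by
      rw [← hout]
    rw [eA]
    exact IH _ _ hinv

lemma pvInv_empty : pvInv PySem.Dict.empty [] := by
  refine ⟨by simp [PySem.Dict.keys_empty], ?_⟩
  intro b p hbp
  rw [PySem.Dict.get?_empty] at hbp
  cases hbp

-- ===== VERDICT (by name: the statement is the Claim_ definition above) =====
theorem fileNaming_spec : Claim_equal_fileNaming := by
  intro names _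
  unfold Spec_fileNaming fileNaming fileNaming_alt
  by_cases h : names = []
  · simp [h]
  · simp only [h, ite_false]
    exact pvLoop names PySem.Dict.empty [] pvInv_empty
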